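-- pv_equiv track=rewrite | github.com/leanprover-community/mathlib4 | scripts/add_set_option.py | is_inside_block_comment
-- ===== SOURCE A (Python) =====
-- def is_inside_block_comment(lines: list[str], line_idx: int) -> bool:
--     """Check if line_idx is inside a /- ... -/ block comment."""
--     for i in range(line_idx - 1, -1, -1):
--         line = lines[i]
--         if "/-" in line:
--             start_pos = line.find("/-")
--             end_pos = line.find("-/", start_pos + 2)
--             if end_pos == -1:
--                 return True
--             return False
--         if "-/" in line:
--             return False
--     return False
-- ===== SOURCE B (Python) =====
-- def is_inside_block_comment(lines: list[str], line_idx: int) -> bool: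
--     """Check if line_idx is inside a /- ... -/ block comment.
--
--     Forward pass: remember the verdict of the most recent marker line."""
--     state = False
--     for line in lines[:max(line_idx, 0)]:
--         if "/-" in line:
--             start = line.find("/-")
--             state = line.find("-/", start + 2) == -1
--         elif "-/" in line:
--             state = False
--     return state
-- ===== Notes on version B (the rewrite author's own statement) =====
-- stated objective: alternative
-- what changed: Replaces the backward early-exit index scan with a forward fold over the line prefix that remembers the verdict of the most recent '/-'/'-/' marker line.
import Mathlib
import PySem

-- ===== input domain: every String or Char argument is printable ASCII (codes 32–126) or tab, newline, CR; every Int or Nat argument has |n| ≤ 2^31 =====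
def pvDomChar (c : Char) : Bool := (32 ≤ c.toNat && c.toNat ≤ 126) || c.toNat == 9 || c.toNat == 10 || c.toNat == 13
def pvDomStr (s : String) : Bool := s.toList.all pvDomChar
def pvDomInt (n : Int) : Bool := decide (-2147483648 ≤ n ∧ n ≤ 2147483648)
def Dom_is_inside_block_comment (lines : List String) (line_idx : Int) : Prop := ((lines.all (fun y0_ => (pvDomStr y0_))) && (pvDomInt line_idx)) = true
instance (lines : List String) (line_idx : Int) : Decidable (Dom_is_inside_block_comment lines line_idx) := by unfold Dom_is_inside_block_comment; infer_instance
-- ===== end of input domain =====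

-- B changes the backward early-exit scan into a forward pass that remembers the last marker line's verdict (alternative decomposition, same cost).

-- ===== PORT A =====
-- backward loop 'for i in range(line_idx-1, -1, -1)' with early returns, as structural recursion over the index list
def pvGoA (lines : List String) : List Int → Bool
  | [] => false
  | i :: rest =>
    match PySem.List.pyGet? lines i with
    | none => false  -- IndexError; excluded by Pre_
    | some line =>
      if PySem.Str.isIn "/-" line then
        if PySem.Str.findFrom line "-/" (PySem.Str.find line "/-" + 2) none == -1 then true else false
      else if PySem.Str.isIn "-/" line then false
      else pvGoA lines rest

def is_inside_block_comment (lines : List String) (line_idx : Int) : Bool :=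
  pvGoA lines (PySem.List.pyRange (line_idx - 1) (-1) (-1))

-- ===== PORT B =====
def is_inside_block_comment_alt (lines : List String) (line_idx : Int) : Bool :=
  (PySem.List.slice lines none (some (max line_idx 0))).foldl
    (fun state line =>
      if PySem.Str.isIn "/-" line then
        PySem.Str.findFrom line "-/" (PySem.Str.find line "/-" + 2) none == -1
      else if PySem.Str.isIn "-/" line then false
      else state) false

-- ===== PRECONDITION & SPEC =====
-- A raises IndexError when line_idx - 1 reaches past the end of lines; exactly those inputs are excluded.
def Pre_is_inside_block_comment (lines : List String) (line_idx : Int) : Prop :=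
  line_idx ≤ (lines.length : Int)
instance (lines : List String) (line_idx : Int) : Decidable (Pre_is_inside_block_comment lines line_idx) := by
  unfold Pre_is_inside_block_comment; infer_instance

def pvWitness_is_inside_block_comment : List String × Int := (["/- a", "x"], 2)

def Spec_is_inside_block_comment (lines : List String) (line_idx : Int) (out : Bool) : Prop := out = is_inside_block_comment_alt lines line_idx
instance (lines : List String) (line_idx : Int) (out : Bool) : Decidable (Spec_is_inside_block_comment lines line_idx out) := by unfold Spec_is_inside_block_comment; infer_instance

-- ===== CLAIM (what is proved, stated in full; the proofs are below) =====
def Claim_equal_is_inside_block_comment : Prop := ∀ (lines : List String) (line_idx : Int), Dom_is_inside_block_comment lines line_idx → Pre_is_inside_block_comment lines line_idx → Spec_is_inside_block_comment lines line_idx (is_inside_block_comment lines line_idx)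

-- ===== LEMMAS AND PROOFS =====

-- the per-line verdict both programs apply to a marker line (none = line has no marker)
def pvRule (line : String) : Option Bool :=
  if PySem.Str.isIn "/-" line then
    some (PySem.Str.findFrom line "-/" (PySem.Str.find line "/-" + 2) none == -1)
  else if PySem.Str.isIn "-/" line then some false
  else none

theorem pvGoA_eq (lines : List String) (n : Nat) (hn : n ≤ lines.length) :
    pvGoA lines ((PySem.List.pyRange 0 (n : Int) 1).reverse)
      = (((lines.take n).reverse).findSome? pvRule).getD false := by
  induction n with
  | zero => simp [PySem.List.pyRange_one_eq_nil, pvGoA]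
  | succ m ih =>
    have hm : m < lines.length := by omega
    have hstep : PySem.List.pyRange 0 ((m + 1 : Nat) : Int) 1
        = PySem.List.pyRange 0 (m : Int) 1 ++ [(m : Int)] := by
      have := PySem.List.pyRange_one_succ_right (a := 0) (b := (m : Int)) (by positivity)
      push_cast
      push_cast at this
      exact this
    rw [hstep, List.reverse_append]
    simp only [List.reverse_cons, List.reverse_nil, List.nil_append, List.cons_append,
      List.nil_append]
    rw [List.take_add_one]
    have hget : lines[(m : Nat)]? = some lines[m] := List.getElem?_eq_getElem hm
    simp only [hget, Option.toList_some]
    rw [List.reverse_append]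
    simp only [List.reverse_cons, List.reverse_nil, List.nil_append, List.cons_append]
    have hpy : PySem.List.pyGet? lines ((m : Nat) : Int) = some lines[m] := by
      rw [PySem.List.pyGet?_natCast lines m, List.getElem?_eq_getElem hm]
    show pvGoA lines ((m : Int) :: (PySem.List.pyRange 0 (m : Int) 1).reverse) = _
    rw [pvGoA, hpy, List.findSome?_cons]
    by_cases h1 : PySem.Chars.isIn ['/', '-'] lines[m].toList
    · simp [pvRule, h1, beq_eq_decide]
    · by_cases h2 : PySem.Chars.isIn ['-', '/'] lines[m].toList
      · simp [pvRule, h1, h2]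
      · simp [pvRule, h1, h2]
        exact ih (by omega)

theorem pvFoldB_eq (l : List String) (acc : Bool) :
    l.foldl
      (fun state line =>
        if PySem.Str.isIn "/-" line then
          PySem.Str.findFrom line "-/" (PySem.Str.find line "/-" + 2) none == -1
        else if PySem.Str.isIn "-/" line then false
        else state) acc
      = ((l.reverse.findSome? pvRule)).getD acc := by
  induction l generalizing acc with
  | nil => simp
  | cons x l ih =>
    rw [List.foldl_cons, ih, List.reverse_cons, List.findSome?_append]
    cases hl : l.reverse.findSome? pvRule with
    | some v => simp
    | none =>
      simp only [List.findSome?_cons, List.findSome?_nil]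
      by_cases h1 : PySem.Chars.isIn ['/', '-'] x.toList
      · simp [pvRule, h1]
      · by_cases h2 : PySem.Chars.isIn ['-', '/'] x.toList <;> simp [pvRule, h1, h2]

theorem pyRange_back (line_idx : Int) :
    PySem.List.pyRange (line_idx - 1) (-1) (-1) = (PySem.List.pyRange 0 line_idx 1).reverse := by
  have := PySem.List.pyRange_neg_one_eq_reverse (a := line_idx - 1) (b := -1)
  simpa using this

-- ===== VERDICT (by name: the statement is the Claim_ definition above) =====
theorem is_inside_block_comment_spec : Claim_equal_is_inside_block_comment := by
  intro lines line_idx _ hpre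
  unfold Spec_is_inside_block_comment is_inside_block_comment is_inside_block_comment_alt
  have hmax : 0 ≤ max line_idx 0 := le_max_right _ _
  rw [PySem.List.slice_to, pyRange_back, pvFoldB_eq]
  have htn : (max line_idx 0).toNat = line_idx.toNat := by omega
  rw [htn]
  have hidx : PySem.List.pyRange 0 line_idx 1 = PySem.List.pyRange 0 (line_idx.toNat : Int) 1 := by
    by_cases h : 0 ≤ line_idx
    · rw [Int.toNat_of_nonneg h]
    · rw [PySem.List.pyRange_one_eq_nil (by omega), PySem.List.pyRange_one_eq_nil (by omega)]
  rw [hidx, pvGoA_eq lines line_idx.toNat (by unfold Pre_is_inside_block_comment at hpre; omega)]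
  exact hmax
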